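-- pv_equiv track=rewrite | github.com/asa99-cpu/cv | scripts/components.py | parse_cv_text
-- ===== SOURCE A (Python) =====
-- def parse_cv_text(cv_text):
--     sections = {}
--     lines = cv_text.split("\n")
--     current_section = None
--
--     for line in lines:
--         line = line.strip()
--         if line.endswith(")"):
--             current_section = line.strip("()")
--             sections[current_section] = ""
--         elif current_section:
--             sections[current_section] += line + "\n"
--
--     return sections
-- ===== SOURCE B (Python) =====
-- def parse_cv_text(cv_text):
--     # two-pass chunking: strip all lines up front, skip the preamble, then
--     # repeatedly consume one header plus its whole body block
--     stripped = [l.strip() for l in cv_text.split("\n")]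
--     i = 0
--     while i < len(stripped) and not stripped[i].endswith(")"):
--         i += 1
--     sections = {}
--     while i < len(stripped):
--         key = stripped[i].strip("()")
--         i += 1
--         body = []
--         while i < len(stripped) and not stripped[i].endswith(")"):
--             body.append(stripped[i])
--             i += 1
--         sections[key] = "".join(l + "\n" for l in body)
--     return sections
-- ===== Notes on version B (the rewrite author's own statement) =====
-- stated objective: alternative
-- what changed: Replaces A's single stateful scan carrying a (sections dict, current_section) state machine by a chunking two-phase pass: strip all lines up front, skip the pre-header preamble, then repeatedly consume one header plus its whole body block and assign the joined block into the dict at once.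
-- intended difference: On inputs where some line consists of nothing but parentheses around whitespace (a header with an empty section name) and is immediately followed by a non-header line, A silently discards those body lines because the empty key makes current_section falsy, leaving the unnamed section empty; B keeps them as that section's body, which is the intended chunking behaviour. — e.g. on parse_cv_text("()\nx"): A returns [("", "")], B returns [("", "x\n")]
import Mathlib
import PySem

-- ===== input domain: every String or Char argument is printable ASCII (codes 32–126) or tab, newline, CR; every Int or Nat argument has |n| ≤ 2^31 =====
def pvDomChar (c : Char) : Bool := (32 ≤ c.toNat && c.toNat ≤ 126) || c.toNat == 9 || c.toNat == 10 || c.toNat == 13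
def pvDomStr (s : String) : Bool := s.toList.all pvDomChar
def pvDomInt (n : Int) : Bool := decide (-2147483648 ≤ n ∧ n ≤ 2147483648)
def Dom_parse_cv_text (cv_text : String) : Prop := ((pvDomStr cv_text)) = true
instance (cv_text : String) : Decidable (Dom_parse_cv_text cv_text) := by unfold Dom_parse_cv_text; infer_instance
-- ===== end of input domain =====

-- B replaces A's single stateful scan (dict + current-section state machine) by a
-- chunking two-pass shape: pre-strip all lines, skip the preamble, then consume one
-- (header, body-block) chunk at a time; same cost, different decomposition.
-- Intended difference (D_ below): body lines right after an empty-named header,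
-- which A silently drops, are kept by B as that section's body.

-- ===== PORT A =====
-- literal transliteration of A: one fold over the lines carrying (sections, current_section)
def parse_cv_text (cv_text : String) : List (String × String) :=
  let lines := (PySem.Str.split? cv_text "\n").getD []   -- nonempty separator, so split? is always some
  let st := lines.foldl (fun (st : PySem.Dict String String × Option String) line =>
    let l := PySem.Str.strip line
    if PySem.Str.endswith l ")" then
      let k := PySem.Str.stripChars l "()"
      (st.1.insert k "", some k)
    else
      match st.2 with
      | some c => if c ≠ "" then (st.1.modify c "" (fun v => v ++ l ++ "\n"), st.2) else st
      | none => st) (PySem.Dict.empty, none)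
  st.1.items

-- ===== PORT B =====
-- helper of port B: the outer chunk loop of Source B — take a header, collect its body
-- block (takeWhile/dropWhile = Source B's inner while advancing i), recurse on the rest
def pvChunks : List String → PySem.Dict String String → PySem.Dict String String
  | [], d => d
  | h :: ls, d =>
    let k := PySem.Str.stripChars h "()"
    let body := ls.takeWhile (fun l => !PySem.Str.endswith l ")")
    let rest := ls.dropWhile (fun l => !PySem.Str.endswith l ")")
    pvChunks rest (d.insert k (body.foldl (fun a l => a ++ l ++ "\n") ""))
  termination_by ls => ls.length
  decreasing_by
    have := List.length_dropWhile_le (fun l => !PySem.Str.endswith l ")") ls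
    simp only [List.length_cons]; omega

def parse_cv_text_alt (cv_text : String) : List (String × String) :=
  let stripped := ((PySem.Str.split? cv_text "\n").getD []).map PySem.Str.strip
  (pvChunks (stripped.dropWhile (fun l => !PySem.Str.endswith l ")")) PySem.Dict.empty).items

-- ===== PRECONDITION & SPEC =====
-- D_: a stripped line is a header whose section name strips away to nothing and the
-- very next line is not a header: A's falsy current_section silently drops those body
-- lines, leaving the unnamed section empty; B keeps them as the section body, which
-- is the intended chunking behaviour.
-- (stripped adjacent lines) some all-parentheses header line — an empty section
-- name — is immediately followed by a line that is not itself a header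
def D_parse_cv_text (cv_text : String) : Prop :=
  let L := (PySem.Chars.splitOn cv_text.toList ['\n']).map PySem.Chars.strip
  (L.zip L.tail).any (fun p =>
    p.1.getLast? == some ')' && p.1.all (fun c => c == '(' || c == ')')
      && p.2.getLast? != some ')') = true
instance (cv_text : String) : Decidable (D_parse_cv_text cv_text) := by
  unfold D_parse_cv_text; infer_instance

def Spec_parse_cv_text (cv_text : String) (out : List (String × String)) : Prop :=
  ¬ D_parse_cv_text cv_text → out = parse_cv_text_alt cv_text
instance (cv_text : String) (out : List (String × String)) : Decidable (Spec_parse_cv_text cv_text out) := by unfold Spec_parse_cv_text; infer_instance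

def pvDiffWitness_parse_cv_text : String := "()\nx"
def pvDiffWitnessOut_parse_cv_text : (List (String × String)) × (List (String × String)) :=
  ([("", "")], [("", "x\n")])

-- ===== CLAIM (what is proved, stated in full; the proofs are below) =====
def Claim_unchanged_parse_cv_text : Prop := ∀ (cv_text : String), Dom_parse_cv_text cv_text → Spec_parse_cv_text cv_text (parse_cv_text cv_text)
def Claim_changed_parse_cv_text : Prop := Dom_parse_cv_text (pvDiffWitness_parse_cv_text) ∧ D_parse_cv_text (pvDiffWitness_parse_cv_text) ∧ parse_cv_text (pvDiffWitness_parse_cv_text) = pvDiffWitnessOut_parse_cv_text.1 ∧ parse_cv_text_alt (pvDiffWitness_parse_cv_text) = pvDiffWitnessOut_parse_cv_text.2 ∧ pvDiffWitnessOut_parse_cv_text.1 ≠ pvDiffWitnessOut_parse_cv_text.2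

-- ===== LEMMAS AND PROOFS =====

-- proof-side Bool form of the change region, bridged to D_parse_cv_text below
def pvParen (c : Char) : Bool := c == '(' || c == ')'

def pvHeaderLine (cs : List Char) : Bool :=
  (PySem.Chars.strip cs).getLast? == some ')'

def pvNamelessHeader (cs : List Char) : Bool :=
  pvHeaderLine cs && (PySem.Chars.strip cs).all pvParen

def pvDanglingBody : List (List Char) → Bool
  | [] => false
  | [_] => false
  | c1 :: c2 :: rest => (pvNamelessHeader c1 && !pvHeaderLine c2) || pvDanglingBody (c2 :: rest)

-- proof-side restatement of the change region on the STRIPPED line strings,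
-- matched to A's vocabulary; bridged to pvDanglingBody below
def pvEmptyHeader (l : String) : Bool :=
  PySem.Str.endswith l ")" && (PySem.Str.stripChars l "()" == "")

def pvDFlag : List String → Bool
  | [] => false
  | l :: ls =>
    (pvEmptyHeader l && (match ls with
      | l2 :: _ => !PySem.Str.endswith l2 ")"
      | [] => false)) || pvDFlag ls

-- A's step on an ALREADY-STRIPPED line
def pvStep (st : PySem.Dict String String × Option String) (l : String) :
    PySem.Dict String String × Option String :=
  if PySem.Str.endswith l ")" then
    let k := PySem.Str.stripChars l "()"
    (st.1.insert k "", some k)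
  else
    match st.2 with
    | some c => if c ≠ "" then (st.1.modify c "" (fun v => v ++ l ++ "\n"), st.2) else st
    | none => st

theorem pvModifyInsert (d : PySem.Dict String String) (k v : String) (f : String → String) :
    (d.insert k v).modify k "" f = d.insert k (f v) := by
  simp [PySem.Dict.modify, PySem.Dict.getD_insert_self, PySem.Dict.insert_insert_self]

-- joint invariant over the remaining (stripped) lines, assuming no empty-named header
-- in them is immediately followed by a non-header line (¬D on the suffix)
theorem pvJoint (n : Nat) : ∀ (xs : List String), xs.length ≤ n → pvDFlag xs = false →
    (∀ (d : PySem.Dict String String) (cur : Option String), (cur = none ∨ cur = some "") →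
      (List.foldl pvStep (d, cur) xs).1
        = pvChunks (xs.dropWhile (fun l => !PySem.Str.endswith l ")")) d) ∧
    (∀ (k : String), k ≠ "" → ∀ (d : PySem.Dict String String) (v : String),
      (List.foldl pvStep (d.insert k v, some k) xs).1
        = pvChunks (xs.dropWhile (fun l => !PySem.Str.endswith l ")"))
            (d.insert k ((xs.takeWhile (fun l => !PySem.Str.endswith l ")")).foldl
              (fun a l => a ++ l ++ "\n") v))) := by
  induction n with
  | zero =>
    intro xs hxs _
    have hnil : xs = [] := List.eq_nil_of_length_eq_zero (Nat.le_zero.mp hxs)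
    subst hnil
    exact ⟨fun d cur _ => by simp [pvChunks], fun k _ d v => by simp [pvChunks]⟩
  | succ n ih =>
    intro xs hxs hD
    cases xs with
    | nil => exact ⟨fun d cur _ => by simp [pvChunks], fun k _ d v => by simp [pvChunks]⟩
    | cons l ls =>
      have hls : ls.length ≤ n := by simp only [List.length_cons] at hxs; omega
      have hDls : pvDFlag ls = false := by
        simp only [pvDFlag, Bool.or_eq_false_iff] at hD; exact hD.2
      -- if l is an empty-named header, ¬D forces its body block to be empty
      have hbody : pvEmptyHeader l = true →
          ls.takeWhile (fun l => !PySem.Str.endswith l ")") = [] := by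
        intro he
        simp only [pvDFlag, Bool.or_eq_false_iff, Bool.and_eq_false_iff] at hD
        cases ls with
        | nil => rfl
        | cons l2 ls' =>
          rcases hD.1 with h | h
          · rw [he] at h; cases h
          · have h2 : PySem.Str.endswith l2 ")" = true := by simpa using h
            simp only [PySem.Str.endswith_eq] at h2
            have h3 : PySem.Chars.endswith l2.toList [')'] = true := by simpa using h2
            simp [h3]
      constructor
      · intro d cur hcur
        by_cases hh : PySem.Str.endswith l ")" = true
        · -- header line
          simp only [PySem.Str.endswith_eq] at hh
          have hh' : PySem.Chars.endswith l.toList [')'] = true := by simpa using hh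
          have hstep : pvStep (d, cur) l
              = (d.insert (PySem.Str.stripChars l "()") "", some (PySem.Str.stripChars l "()")) := by
            simp [pvStep, hh']
          rw [List.foldl_cons, hstep]
          have hdrop : (l :: ls).dropWhile (fun l => !PySem.Str.endswith l ")") = l :: ls := by
            simp [hh']
          rw [hdrop, pvChunks]
          by_cases hke : PySem.Str.stripChars l "()" = ""
          · have he : pvEmptyHeader l = true := by
              simp [pvEmptyHeader, hh', hke]
            rw [hke, hbody he]
            simpa using (ih ls hls hDls).1 (d.insert "" "") (some "") (Or.inr rfl)
          · have := (ih ls hls hDls).2 (PySem.Str.stripChars l "()") hke d ""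
            simpa using this
        · -- non-header, cur falsy → skipped
          simp only [PySem.Str.endswith_eq] at hh
          have hh' : PySem.Chars.endswith l.toList [')'] = false := by
            simpa using hh
          have hstep : pvStep (d, cur) l = (d, cur) := by
            rcases hcur with h | h <;> subst h <;> simp [pvStep, hh']
          rw [List.foldl_cons, hstep]
          have hdrop : (l :: ls).dropWhile (fun l => !PySem.Str.endswith l ")")
              = ls.dropWhile (fun l => !PySem.Str.endswith l ")") := by
            simp [hh']
          rw [hdrop]
          exact (ih ls hls hDls).1 d cur hcur
      · intro k hke d v
        by_cases hh : PySem.Str.endswith l ")" = true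
        · -- header line ends the body block
          simp only [PySem.Str.endswith_eq] at hh
          have hh' : PySem.Chars.endswith l.toList [')'] = true := by simpa using hh
          have hstep : pvStep (d.insert k v, some k) l
              = ((d.insert k v).insert (PySem.Str.stripChars l "()") "",
                 some (PySem.Str.stripChars l "()")) := by
            simp [pvStep, hh']
          rw [List.foldl_cons, hstep]
          have htake : (l :: ls).takeWhile (fun l => !PySem.Str.endswith l ")") = [] := by
            simp [hh']
          have hdrop : (l :: ls).dropWhile (fun l => !PySem.Str.endswith l ")") = l :: ls := by
            simp [hh']
          rw [htake, hdrop, pvChunks]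
          simp only [List.foldl_nil]
          by_cases hke' : PySem.Str.stripChars l "()" = ""
          · have he : pvEmptyHeader l = true := by
              simp [pvEmptyHeader, hh', hke']
            rw [hke', hbody he]
            simpa using (ih ls hls hDls).1 ((d.insert k v).insert "" "") (some "") (Or.inr rfl)
          · have := (ih ls hls hDls).2 (PySem.Str.stripChars l "()") hke' (d.insert k v) ""
            simpa using this
        · -- body line: appended to the current section
          simp only [PySem.Str.endswith_eq] at hh
          have hh' : PySem.Chars.endswith l.toList [')'] = false := by
            simpa using hh
          have hstep : pvStep (d.insert k v, some k) l
              = (d.insert k (v ++ l ++ "\n"), some k) := by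
            simp [pvStep, hh', hke, pvModifyInsert]
          rw [List.foldl_cons, hstep]
          have htake : (l :: ls).takeWhile (fun l => !PySem.Str.endswith l ")")
              = l :: ls.takeWhile (fun l => !PySem.Str.endswith l ")") := by
            simp [hh']
          have hdrop : (l :: ls).dropWhile (fun l => !PySem.Str.endswith l ")")
              = ls.dropWhile (fun l => !PySem.Str.endswith l ")") := by
            simp [hh']
          rw [htake, hdrop]
          simpa using (ih ls hls hDls).2 k hke d (v ++ l ++ "\n")

-- bridges: the shape condition pvDanglingBody equals pvDFlag on the stripped lines

theorem pvLastBridge (t : List Char) :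
    PySem.Chars.endswith t [')'] = (t.getLast? == some ')') := by
  simp only [PySem.Chars.endswith, List.isSuffixOf, List.getLast?_eq_head?_reverse]
  cases t.reverse with
  | nil => rfl
  | cons c r => simp [List.isPrefixOf, eq_comm]

theorem pvContainsParen (c : Char) : (['(', ')'].contains c) = pvParen c := by
  rw [Bool.eq_iff_iff]
  simp [pvParen, List.contains_eq_mem]

theorem pvStripCharsNilIff (t : List Char) :
    (PySem.Chars.stripChars t ['(', ')'] == []) = t.all pvParen := by
  rw [Bool.eq_iff_iff]
  simp only [beq_iff_eq, List.all_eq_true, PySem.Chars.stripChars, List.reverse_eq_nil_iff,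
    List.dropWhile_eq_nil_iff]
  constructor
  · intro h x hx
    rw [← pvContainsParen]
    rcases (List.takeWhile_append_dropWhile (p := fun c => List.contains ['(', ')'] c)
        (l := t)) ▸ hx |> List.mem_append.mp with h1 | h1
    · exact List.mem_takeWhile_imp h1
    · exact h x (List.mem_reverse.mpr h1)
  · intro h x hx
    rw [pvContainsParen]
    exact h x ((List.dropWhile_sublist _).subset (List.mem_reverse.mp hx))

theorem pvHeaderBridge (cs : List Char) :
    PySem.Str.endswith (PySem.Str.strip (String.ofList cs)) ")" = pvHeaderLine cs := by
  have h : (")" : String).toList = [')'] := by decide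
  rw [pvHeaderLine, PySem.Str.endswith_eq, PySem.Str.toList_strip, h, pvLastBridge]
  simp

theorem pvEmptyBridge (cs : List Char) :
    pvEmptyHeader (PySem.Str.strip (String.ofList cs)) = pvNamelessHeader cs := by
  have h : ("()" : String).toList = ['(', ')'] := by decide
  have h2 : (PySem.Str.stripChars (PySem.Str.strip (String.ofList cs)) "()").toList
      = PySem.Chars.stripChars (PySem.Chars.strip cs) ['(', ')'] := by
    rw [PySem.Str.toList_stripChars, PySem.Str.toList_strip, h]
    simp
  have h3 : (PySem.Str.stripChars (PySem.Str.strip (String.ofList cs)) "()" == "")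
      = (PySem.Chars.strip cs).all pvParen := by
    calc (PySem.Str.stripChars (PySem.Str.strip (String.ofList cs)) "()" == "")
        = ((PySem.Str.stripChars (PySem.Str.strip (String.ofList cs)) "()").toList == []) := by
          rw [Bool.eq_iff_iff]; simp [String.ext_iff]
      _ = (PySem.Chars.stripChars (PySem.Chars.strip cs) ['(', ')'] == []) := by rw [h2]
      _ = (PySem.Chars.strip cs).all pvParen := pvStripCharsNilIff _
  unfold pvEmptyHeader pvNamelessHeader
  rw [pvHeaderBridge, h3]

theorem pvDListBridge (L : List (List Char)) :
    pvDFlag (L.map (fun cs => PySem.Str.strip (String.ofList cs))) = pvDanglingBody L := by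
  induction L with
  | nil => rfl
  | cons c1 rest ih =>
    cases rest with
    | nil => simp [pvDFlag, pvDanglingBody]
    | cons c2 rest' =>
      simp only [List.map_cons, pvDFlag, pvDanglingBody] at ih ⊢
      rw [pvEmptyBridge, pvHeaderBridge, ih]

theorem pvDanglingIff (L : List (List Char)) :
    pvDanglingBody L
      = ((L.map PySem.Chars.strip).zip (L.map PySem.Chars.strip).tail).any (fun p =>
          p.1.getLast? == some ')' && p.1.all (fun c => c == '(' || c == ')')
            && p.2.getLast? != some ')') := by
  induction L with
  | nil => rfl
  | cons c1 rest ih =>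
    cases rest with
    | nil => simp [pvDanglingBody]
    | cons c2 rest' =>
      rw [pvDanglingBody]
      simp only [List.map_cons, List.tail_cons, List.zip_cons_cons, List.any_cons, ih]
      have hh : (pvNamelessHeader c1 && !pvHeaderLine c2)
          = ((PySem.Chars.strip c1).getLast? == some ')'
              && (PySem.Chars.strip c1).all (fun c => c == '(' || c == ')')
              && (PySem.Chars.strip c2).getLast? != some ')') := by
        simp [pvNamelessHeader, pvHeaderLine, Bool.and_assoc, bne]
        rfl
      rw [hh]

theorem pvDBridge (cv : String) :
    pvDFlag (((PySem.Str.split? cv "\n").getD []).map PySem.Str.strip)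
      = pvDanglingBody (PySem.Chars.splitOn cv.toList ['\n']) := by
  have h : ("\n" : String).toList = ['\n'] := by decide
  have hs : PySem.Str.split? cv "\n"
      = some (List.map String.ofList (PySem.Chars.splitOn cv.toList ['\n'])) := by
    rw [PySem.Str.split?, PySem.Chars.split?, h]
    simp
  rw [hs]
  simp only [Option.getD_some, List.map_map]
  rw [← pvDListBridge]
  rfl

-- ===== VERDICT (by name: the statements are the Claim_ definitions above) =====
theorem parse_cv_text_spec : Claim_unchanged_parse_cv_text := by
  intro cv_text _ hD
  unfold parse_cv_text parse_cv_text_alt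
  set lines := (PySem.Str.split? cv_text "\n").getD [] with hl
  have hmap : List.foldl
      (fun (st : PySem.Dict String String × Option String) line =>
        let l := PySem.Str.strip line
        if PySem.Str.endswith l ")" then
          let k := PySem.Str.stripChars l "()"
          (st.1.insert k "", some k)
        else
          match st.2 with
          | some c => if c ≠ "" then (st.1.modify c "" (fun v => v ++ l ++ "\n"), st.2) else st
          | none => st) (PySem.Dict.empty, none) lines
      = List.foldl pvStep (PySem.Dict.empty, none) (lines.map PySem.Str.strip) := by
    rw [List.foldl_map]
    rfl
  simp only [hmap]
  have hDf : pvDFlag (lines.map PySem.Str.strip) = false := by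
    unfold D_parse_cv_text at hD
    rw [hl, pvDBridge, pvDanglingIff]
    exact Bool.eq_false_iff.mpr hD
  have := (pvJoint (lines.map PySem.Str.strip).length (lines.map PySem.Str.strip) le_rfl hDf).1
      PySem.Dict.empty none (Or.inl rfl)
  rw [this]

-- evaluate B's port at the witness by unfolding pvChunks's equations (WF recursion
-- does not reduce under `decide`)
theorem pvAltWitness : parse_cv_text_alt pvDiffWitness_parse_cv_text = [("", "x\n")] := by
  unfold parse_cv_text_alt pvDiffWitness_parse_cv_text
  show (pvChunks (List.dropWhile (fun l => !PySem.Str.endswith l ")")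
      (List.map PySem.Str.strip ((PySem.Str.split? "()\nx" "\n").getD []))) PySem.Dict.empty).items
      = [("", "x\n")]
  have h2 : (((PySem.Str.split? "()\nx" "\n").getD []).map PySem.Str.strip).dropWhile
      (fun l => !PySem.Str.endswith l ")") = ["()", "x"] := by decide
  rw [h2, pvChunks]
  have h3 : (["x"].takeWhile (fun l => !PySem.Str.endswith l ")")) = ["x"] := by decide
  have h4 : (["x"].dropWhile (fun l => !PySem.Str.endswith l ")")) = [] := by decide
  simp only [h3, h4, pvChunks]
  decide

theorem parse_cv_text_changed : Claim_changed_parse_cv_text := by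
  unfold Claim_changed_parse_cv_text
  refine ⟨by decide, by decide, by decide, pvAltWitness, by decide⟩
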